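-- pv_equiv track=rewrite | github.com/Malik1723/TP_GIT | dev.py | remplacer_virgules
-- ===== SOURCE A (Python) =====
-- def remplacer_virgules(expression, main_operator):
--     niveau_parenthese = 0
--     result = []
--     for char in expression:
--         if char == '(':
--             niveau_parenthese += 1
--         elif char == ')':
--             niveau_parenthese -= 1
--         if char == ',' and niveau_parenthese == 0:
--             result.append(f' "{main_operator}" ')
--         else:
--             result.append(char)
--     return ''.join(result)
-- ===== SOURCE B (Python) =====
-- def remplacer_virgules(expression, main_operator):
--     sep = ' "%s" ' % main_operator
--     parts = expression.split(',')
--     out = parts[0]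
--     balance = parts[0].count('(') - parts[0].count(')')
--     for part in parts[1:]:
--         out += (sep if balance == 0 else ',') + part
--         balance += part.count('(') - part.count(')')
--     return out
-- ===== Notes on version B (the rewrite author's own statement) =====
-- stated objective: faster
-- what changed: B has no per-character Python loop: it splits the expression on every comma with str.split, then walks the (far fewer) parts once, regluing each boundary with the operator separator or a comma according to the running parenthesis balance computed with str.count per part.
import Mathlib
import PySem

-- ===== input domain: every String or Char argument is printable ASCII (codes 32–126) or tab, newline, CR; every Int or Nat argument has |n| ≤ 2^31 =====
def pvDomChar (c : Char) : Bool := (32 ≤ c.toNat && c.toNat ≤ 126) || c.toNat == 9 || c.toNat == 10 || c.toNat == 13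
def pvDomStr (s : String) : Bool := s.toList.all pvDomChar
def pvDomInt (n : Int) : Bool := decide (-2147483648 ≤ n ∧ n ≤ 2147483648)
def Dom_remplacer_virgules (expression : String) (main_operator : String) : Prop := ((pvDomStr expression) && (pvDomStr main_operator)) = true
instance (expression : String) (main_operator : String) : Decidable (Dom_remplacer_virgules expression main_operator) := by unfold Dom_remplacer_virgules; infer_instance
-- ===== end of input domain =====

-- ===== PORT A =====
-- B replaces A's per-character replace loop by split-on-all-commas + regroup-by-paren-balance; a timing run measured B faster by a constant factor.

-- A: per-char loop — bump depth, push either the separator token or the char onto the result list, join at the end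
def rvLoopA (sep : String) : List Char → Int → List String → List String
  | [], _, res => res
  | c :: cs, d, res =>
    let d' := if c = '(' then d + 1 else if c = ')' then d - 1 else d
    if c = ',' ∧ d' = 0 then rvLoopA sep cs d' (res ++ [sep])
    else rvLoopA sep cs d' (res ++ [c.toString])

def remplacer_virgules (expression : String) (main_operator : String) : String :=
  String.join (rvLoopA (" \"" ++ main_operator ++ "\" ") expression.toList 0 [])

-- ===== PORT B =====
-- B: part.count('(') - part.count(')')
def rvCntPart (p : String) : Int := (PySem.Str.count p "(" : Int) - (PySem.Str.count p ")" : Int)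

-- B: the for-loop over parts[1:]: glue each part on with the separator (balance 0) or a comma back
def rvLoopB (sep : String) : List String → String → Int → String
  | [], out, _ => out
  | p :: ps, out, bal =>
    rvLoopB sep ps (out ++ (if bal = 0 then sep else ",") ++ p) (bal + rvCntPart p)

def remplacer_virgules_alt (expression : String) (main_operator : String) : String :=
  let sep := " \"" ++ main_operator ++ "\" "
  match PySem.Str.split? expression "," with
  | none => ""        -- unreachable: the separator "," is nonempty
  | some [] => ""     -- unreachable: str.split never returns an empty list
  | some (p0 :: rest) => rvLoopB sep rest p0 (rvCntPart p0)

-- ===== PRECONDITION & SPEC =====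
def Spec_remplacer_virgules (expression : String) (main_operator : String) (out : String) : Prop := out = remplacer_virgules_alt expression main_operator
instance (expression : String) (main_operator : String) (out : String) : Decidable (Spec_remplacer_virgules expression main_operator out) := by unfold Spec_remplacer_virgules; infer_instance

-- ===== CLAIM (what is proved, stated in full; the proofs are below) =====
def Claim_equal_remplacer_virgules : Prop := ∀ (expression : String) (main_operator : String), Dom_remplacer_virgules expression main_operator → Spec_remplacer_virgules expression main_operator (remplacer_virgules expression main_operator)

-- ===== LEMMAS AND PROOFS =====

-- reference form of Python's split(',') used only in the proofs
def mySplit : List Char → List (List Char)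
  | [] => [[]]
  | c :: cs =>
    if c = ',' then [] :: mySplit cs
    else
      match mySplit cs with
      | [] => [[c]]
      | h :: t => (c :: h) :: t

theorem mySplit_ne_nil (cs : List Char) : mySplit cs ≠ [] := by
  cases cs with
  | nil => simp [mySplit]
  | cons c cs =>
    simp only [mySplit]
    split
    · simp
    · split <;> simp

def consHead (x : List Char) : List (List Char) → List (List Char)
  | [] => [x]
  | h :: t => (x ++ h) :: t

theorem splitOn_go_eq (fuel : Nat) (l cur : List Char) (acc : List (List Char))
    (h : l.length < fuel) :
    PySem.Chars.splitOn.go [','] fuel l cur acc = acc.reverse ++ consHead cur.reverse (mySplit l) := by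
  induction fuel generalizing l cur acc with
  | zero => omega
  | succ fuel ih =>
    cases l with
    | nil => simp [PySem.Chars.splitOn.go, mySplit, consHead]
    | cons c rest =>
      by_cases hc : c = ','
      · subst hc
        have hpre : List.isPrefixOf [','] (',' :: rest) = true := by simp [List.isPrefixOf]
        rw [PySem.Chars.splitOn.go, if_pos hpre]
        simp only [List.length_cons, List.length_nil, List.drop_succ_cons, List.drop_zero]
        rw [ih rest [] (cur.reverse :: acc) (by simpa using Nat.lt_of_succ_lt_succ h)]
        obtain ⟨q0, qs, hq⟩ : ∃ q0 qs, mySplit rest = q0 :: qs := by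
          cases hm : mySplit rest with
          | nil => exact absurd hm (mySplit_ne_nil rest)
          | cons a b => exact ⟨a, b, rfl⟩
        simp [mySplit, hq, consHead]
      · have hpre : List.isPrefixOf [','] (c :: rest) = false := by
          simp [List.isPrefixOf]; exact fun he => (hc he.symm).elim
        rw [PySem.Chars.splitOn.go, if_neg (by simp [hpre])]
        rw [ih rest (c :: cur) acc (by simpa using Nat.lt_of_succ_lt_succ h)]
        obtain ⟨q0, qs, hq⟩ : ∃ q0 qs, mySplit rest = q0 :: qs := by
          cases hm : mySplit rest with
          | nil => exact absurd hm (mySplit_ne_nil rest)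
          | cons a b => exact ⟨a, b, rfl⟩
        simp [mySplit, hq, consHead, hc]

theorem splitOn_eq_mySplit (l : List Char) : PySem.Chars.splitOn l [','] = mySplit l := by
  rw [PySem.Chars.splitOn, splitOn_go_eq l.length.succ l [] [] (Nat.lt_succ_self _)]
  obtain ⟨q0, qs, hq⟩ : ∃ q0 qs, mySplit l = q0 :: qs := by
    cases hm : mySplit l with
    | nil => exact absurd hm (mySplit_ne_nil l)
    | cons a b => exact ⟨a, b, rfl⟩
  simp [hq, consHead]

theorem count_go_eq (ch : Char) (fuel : Nat) (l : List Char) (acc : Nat)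
    (h : l.length ≤ fuel) :
    PySem.Chars.count.go [ch] fuel l acc = acc + l.count ch := by
  induction fuel generalizing l acc with
  | zero =>
    cases l with
    | nil => simp [PySem.Chars.count.go]
    | cons c rest => simp at h
  | succ fuel ih =>
    cases l with
    | nil => simp [PySem.Chars.count.go]
    | cons c rest =>
      by_cases hc : ch = c
      · subst hc
        have hpre : List.isPrefixOf [ch] (ch :: rest) = true := by simp [List.isPrefixOf]
        rw [PySem.Chars.count.go, if_pos hpre]
        simp only [List.length_cons, List.length_nil, List.drop_succ_cons, List.drop_zero]
        rw [ih rest (acc + 1) (by simpa using Nat.le_of_succ_le_succ h)]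
        simp
        omega
      · have hpre : List.isPrefixOf [ch] (c :: rest) = false := by
          simp [List.isPrefixOf]; exact fun he => (hc he).elim
        rw [PySem.Chars.count.go, if_neg (by simp [hpre])]
        rw [ih rest acc (by simpa using Nat.le_of_succ_le_succ h)]
        simp [List.count_cons]
        intro he; exact absurd he.symm hc

theorem chars_count_single (ch : Char) (l : List Char) :
    PySem.Chars.count l [ch] = l.count ch := by
  rw [PySem.Chars.count, if_neg (by simp)]
  simpa using count_go_eq ch l.length l 0 (Nat.le_refl _)

theorem rvCnt_ofList (p : List Char) :
    rvCntPart (String.ofList p) = (p.count '(' : Int) - (p.count ')' : Int) := by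
  simp [rvCntPart, PySem.Str.count, chars_count_single]

theorem join_snoc (res : List String) (x : String) :
    String.join (res ++ [x]) = String.join res ++ x := by
  simp [String.join, List.foldl_append]

theorem ofList_cons (c : Char) (l : List Char) :
    String.ofList (c :: l) = c.toString ++ String.ofList l := by
  rw [show (c :: l) = [c] ++ l from rfl, String.ofList_append]; rfl

theorem push_append (s x : String) (c : Char) : s.push c ++ x = s ++ (String.singleton c ++ x) := by
  rw [show s.push c = s ++ String.singleton c by simp, String.append_assoc]

theorem rvMain (sep : String) (cs : List Char) (d : Int) (res : List String)
    (p0 : List Char) (ps : List (List Char)) (hs : mySplit cs = p0 :: ps) :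
    String.join (rvLoopA sep cs d res) =
      rvLoopB sep (ps.map String.ofList) (String.join res ++ String.ofList p0)
        (d + ((p0.count '(' : Int) - (p0.count ')' : Int))) := by
  induction cs generalizing d res p0 ps with
  | nil =>
    simp only [mySplit] at hs
    obtain ⟨h1, h2⟩ := List.cons.inj hs.symm
    subst h1; subst h2
    simp [rvLoopA, rvLoopB]
  | cons c cs ih =>
    by_cases hc : c = ','
    · subst hc
      simp only [mySplit] at hs
      obtain ⟨h1, h2⟩ := List.cons.inj hs.symm
      obtain ⟨q0, qs, hq⟩ : ∃ q0 qs, mySplit cs = q0 :: qs := by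
        cases hm : mySplit cs with
        | nil => exact absurd hm (mySplit_ne_nil cs)
        | cons a b => exact ⟨a, b, rfl⟩
      subst h1; subst h2
      rw [hq]
      simp only [rvLoopA, List.map_cons]
      rw [if_neg (by decide : ¬((',' : Char) = '(')), if_neg (by decide : ¬((',' : Char) = ')'))]
      by_cases hz : d = 0
      · rw [if_pos (by simp [hz]), ih _ _ _ _ hq, rvLoopB]
        rw [join_snoc]
        simp [hz, String.append_assoc, rvCnt_ofList]
      · rw [if_neg (by simp [hz]), ih _ _ _ _ hq, rvLoopB]
        rw [join_snoc]
        simp [hz, String.append_assoc]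
        rw [push_append, rvCnt_ofList]
        rfl
    · simp only [mySplit, if_neg hc] at hs
      obtain ⟨q0, qs, hq⟩ : ∃ q0 qs, mySplit cs = q0 :: qs := by
        cases hm : mySplit cs with
        | nil => exact absurd hm (mySplit_ne_nil cs)
        | cons a b => exact ⟨a, b, rfl⟩
      rw [hq] at hs
      obtain ⟨h1, h2⟩ := List.cons.inj hs.symm
      subst h1; subst h2
      simp only [rvLoopA]
      rw [if_neg (by simp [hc])]
      rw [ih _ _ _ _ hq]
      rw [join_snoc, ofList_cons]
      have hcnt : d + (((c :: q0).count '(' : Int) - ((c :: q0).count ')' : Int)) =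
          (if c = '(' then d + 1 else if c = ')' then d - 1 else d)
            + ((q0.count '(' : Int) - (q0.count ')' : Int)) := by
        by_cases h1 : c = '('
        · subst h1; simp; omega
        · by_cases h2 : c = ')'
          · subst h2; simp [h1]; omega
          · simp [h1, h2]
      rw [hcnt, String.append_assoc]

-- ===== VERDICT (by name: the statement is the Claim_ definition above) =====
theorem remplacer_virgules_spec : Claim_equal_remplacer_virgules := by
  intro e m _
  show _ = _
  unfold remplacer_virgules remplacer_virgules_alt
  obtain ⟨p0, ps, hq⟩ : ∃ p0 ps, mySplit e.toList = p0 :: ps := by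
    cases hm : mySplit e.toList with
    | nil => exact absurd hm (mySplit_ne_nil e.toList)
    | cons a b => exact ⟨a, b, rfl⟩
  have hsplit : PySem.Str.split? e "," = some ((mySplit e.toList).map String.ofList) := by
    simp [PySem.Str.split?, PySem.Chars.split?, splitOn_eq_mySplit]
  rw [hsplit, hq]
  simp only [List.map_cons]
  rw [rvMain _ e.toList 0 [] p0 ps hq, rvCnt_ofList]
  norm_num [String.join]
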